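-- pv_equiv track=rewrite | github.com/kranti-up/clembench | clemtod/computetaskmetrics.py | getslotvaluesbycategories
-- ===== SOURCE A (Python) =====
-- def getslotvaluesbycategories(slots: dict):
--         infoslots = {}
--         attrslots = {}
--         bookslots = {}
--         info_fail_slots = {}
--         book_fail_slots = {}
--
--         for domain, dvalue in slots.items():
--             for key, kvalue in dvalue.items():
--                 if key == "info":
--                     if domain not in infoslots:
--                         infoslots[domain] = {}
--
--                     for k, v in kvalue.items():
--                         infoslots[domain][k] = v
--
--                 if key == "fail_info":
--                     if domain not in info_fail_slots:
--                         info_fail_slots[domain] = {}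
--
--                     for k, v in kvalue.items():
--                         info_fail_slots[domain][k] = v
--
--                 elif key == "book":
--                     if domain not in bookslots:
--                         bookslots[domain] = {}
--
--                     for k, v in kvalue.items():
--                         if k in ["invalid", "pre_invalid"]:
--                             continue
--                         bookslots[domain][f"book{k}"] = v
--
--                 elif key == "fail_book":
--                     if domain not in book_fail_slots:
--                         book_fail_slots[domain] = {}
--
--                     for k, v in kvalue.items():
--                         if k in ["invalid", "pre_invalid"]:
--                             continue
--                         book_fail_slots[domain][f"book{k}"] = v
--
--                 elif key == "reqt":
--                     if domain not in attrslots: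
--                         attrslots[domain] = {}
--
--                     attrslots[domain] = kvalue
--                 else:
--                     continue
--
--         return infoslots, bookslots, attrslots, info_fail_slots, book_fail_slots
-- ===== SOURCE B (Python) =====
-- def getslotvaluesbycategories(slots: dict):
--     # One dict comprehension per category, keyed by direct subkey lookup
--     # (no per-key dispatch loop); reqt values are shared by reference, as in the original.
--     infoslots = {d: dict(v["info"]) for d, v in slots.items() if "info" in v}
--     info_fail_slots = {d: dict(v["fail_info"]) for d, v in slots.items() if "fail_info" in v}
--     bookslots = {d: {f"book{k}": x for k, x in v["book"].items()
--                      if k not in ("invalid", "pre_invalid")}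
--                  for d, v in slots.items() if "book" in v}
--     book_fail_slots = {d: {f"book{k}": x for k, x in v["fail_book"].items()
--                            if k not in ("invalid", "pre_invalid")}
--                        for d, v in slots.items() if "fail_book" in v}
--     attrslots = {d: v["reqt"] for d, v in slots.items() if "reqt" in v}
--     return infoslots, bookslots, attrslots, info_fail_slots, book_fail_slots
-- ===== Notes on version B (the rewrite author's own statement) =====
-- stated objective: simpler
-- what changed: A single pass per category with a direct dict lookup and one comprehension each replaces A's nested per-key dispatch loop with five mutable accumulator dicts; reqt values stay aliased by reference as in A.
import Mathlib
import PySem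

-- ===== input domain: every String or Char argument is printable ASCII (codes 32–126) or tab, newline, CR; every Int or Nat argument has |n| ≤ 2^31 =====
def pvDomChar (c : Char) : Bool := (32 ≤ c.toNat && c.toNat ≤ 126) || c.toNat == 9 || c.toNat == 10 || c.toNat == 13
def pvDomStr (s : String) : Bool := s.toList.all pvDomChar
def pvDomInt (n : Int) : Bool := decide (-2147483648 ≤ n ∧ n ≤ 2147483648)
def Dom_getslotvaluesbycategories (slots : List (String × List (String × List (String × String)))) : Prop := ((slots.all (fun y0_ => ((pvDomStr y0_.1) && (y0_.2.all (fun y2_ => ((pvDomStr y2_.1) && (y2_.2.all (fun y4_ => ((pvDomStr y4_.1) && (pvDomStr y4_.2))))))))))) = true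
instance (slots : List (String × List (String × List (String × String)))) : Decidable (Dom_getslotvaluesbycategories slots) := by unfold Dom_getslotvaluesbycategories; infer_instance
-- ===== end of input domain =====

-- B replaces A's per-key dispatch loop by one direct per-category lookup/comprehension per output
-- dict (objective: simpler); return-value equivalence only (neither version mutates its argument).

-- ===== PORT A =====
-- A keeps five dicts-of-dicts; state in A's return order (info, book, attr, fail_info, fail_book).
abbrev pvD2 := PySem.Dict String (PySem.Dict String String)
abbrev pvSt := pvD2 × pvD2 × pvD2 × pvD2 × pvD2

-- 'if domain not in slots: slots[domain] = {}' followed by 'for k, v in kvalue.items(): slots[domain][k] = v'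
def pvUpdCopy (domain : String) (c : pvD2) (kv : List (String × String)) : pvD2 :=
  kv.foldl (fun d q => d.insert domain ((d.getD domain PySem.Dict.empty).insert q.1 q.2))
    (if c.contains domain then c else c.insert domain PySem.Dict.empty)

-- same, with the 'continue' guard and the 'book' key prefix
def pvUpdBook (domain : String) (c : pvD2) (kv : List (String × String)) : pvD2 :=
  kv.foldl (fun d q => if q.1 == "invalid" || q.1 == "pre_invalid" then d
      else d.insert domain ((d.getD domain PySem.Dict.empty).insert ("book" ++ q.1) q.2))
    (if c.contains domain then c else c.insert domain PySem.Dict.empty)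

-- 'if domain not in attrslots: attrslots[domain] = {}' then 'attrslots[domain] = kvalue'
def pvUpdReqt (domain : String) (c : pvD2) (kv : List (String × String)) : pvD2 :=
  (if c.contains domain then c else c.insert domain PySem.Dict.empty).insert domain (PySem.Dict.mk kv)

-- body of A's inner loop: the separate 'if key == "info"' first, then the if/elif chain
def pvKeyStepA (domain : String) (st : pvSt) (p : String × List (String × String)) : pvSt :=
  let i0 := if p.1 == "info" then pvUpdCopy domain st.1 p.2 else st.1
  if p.1 == "fail_info" then (i0, st.2.1, st.2.2.1, pvUpdCopy domain st.2.2.2.1 p.2, st.2.2.2.2)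
  else if p.1 == "book" then (i0, pvUpdBook domain st.2.1 p.2, st.2.2.1, st.2.2.2.1, st.2.2.2.2)
  else if p.1 == "fail_book" then (i0, st.2.1, st.2.2.1, st.2.2.2.1, pvUpdBook domain st.2.2.2.2 p.2)
  else if p.1 == "reqt" then (i0, st.2.1, pvUpdReqt domain st.2.2.1 p.2, st.2.2.2.1, st.2.2.2.2)
  else (i0, st.2.1, st.2.2.1, st.2.2.2.1, st.2.2.2.2)

def pvFoldA (slots : List (String × List (String × List (String × String)))) : pvSt :=
  slots.foldl (fun st q => q.2.foldl (pvKeyStepA q.1) st)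
    (PySem.Dict.empty, PySem.Dict.empty, PySem.Dict.empty, PySem.Dict.empty, PySem.Dict.empty)

-- a dict-of-dicts rendered as the nested assoc lists the convention returns
def pvItems2 (d : pvD2) : List (String × List (String × String)) :=
  d.items.map (fun p => (p.1, p.2.items))

def getslotvaluesbycategories (slots : List (String × List (String × List (String × String)))) : (List (String × List (String × String))) × (List (String × List (String × String))) × (List (String × List (String × String))) × (List (String × List (String × String))) × (List (String × List (String × String))) :=
  let st := pvFoldA slots
  (pvItems2 st.1, pvItems2 st.2.1, pvItems2 st.2.2.1, pvItems2 st.2.2.2.1, pvItems2 st.2.2.2.2)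

-- ===== PORT B =====
-- Source B's _bookdict comprehension: prefix keys with "book", skip invalid/pre_invalid
-- (a dict comprehension over the distinct keys of a dict is exactly this filtered, mapped assoc list)
def pvBookList (kv : List (String × String)) : List (String × String) :=
  (kv.filter (fun q => !(q.1 == "invalid" || q.1 == "pre_invalid"))).map (fun q => ("book" ++ q.1, q.2))

-- each of Source B's five comprehensions: '{d: T(v[key]) for d, v in slots.items() if key in v}';
-- dict(v[key]) and v["reqt"]-by-reference are both the identity on the assoc list
def getslotvaluesbycategories_alt (slots : List (String × List (String × List (String × String)))) : (List (String × List (String × String))) × (List (String × List (String × String))) × (List (String × List (String × String))) × (List (String × List (String × String))) × (List (String × List (String × String))) :=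
  (slots.filterMap (fun q => ((PySem.Dict.mk q.2).get? "info").map (fun kv => (q.1, kv))),
   slots.filterMap (fun q => ((PySem.Dict.mk q.2).get? "book").map (fun kv => (q.1, pvBookList kv))),
   slots.filterMap (fun q => ((PySem.Dict.mk q.2).get? "reqt").map (fun kv => (q.1, kv))),
   slots.filterMap (fun q => ((PySem.Dict.mk q.2).get? "fail_info").map (fun kv => (q.1, kv))),
   slots.filterMap (fun q => ((PySem.Dict.mk q.2).get? "fail_book").map (fun kv => (q.1, pvBookList kv))))

-- ===== PRECONDITION & SPEC =====
-- Pre_ is the invariant of the dict→assoc-list representation (Python dict keys are unique at each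
-- nesting level); it excludes no input reachable from a Python dict.
def Pre_getslotvaluesbycategories (slots : List (String × List (String × List (String × String)))) : Prop :=
  (slots.map Prod.fst).Nodup ∧ ∀ q ∈ slots, (q.2.map Prod.fst).Nodup ∧ ∀ p ∈ q.2, (p.2.map Prod.fst).Nodup
instance (slots : List (String × List (String × List (String × String)))) : Decidable (Pre_getslotvaluesbycategories slots) := by unfold Pre_getslotvaluesbycategories; infer_instance

def pvWitness_getslotvaluesbycategories : (List (String × List (String × List (String × String)))) :=
  [("hotel", [("info", [("area", "north")]),
              ("book", [("day", "monday"), ("invalid", "x")]),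
              ("reqt", [("phone", "")])]),
   ("train", [("fail_info", [("dest", "cambridge")])])]

def Spec_getslotvaluesbycategories (slots : List (String × List (String × List (String × String)))) (out : (List (String × List (String × String))) × (List (String × List (String × String))) × (List (String × List (String × String))) × (List (String × List (String × String))) × (List (String × List (String × String)))) : Prop := out = getslotvaluesbycategories_alt slots
instance (slots : List (String × List (String × List (String × String)))) (out : (List (String × List (String × String))) × (List (String × List (String × String))) × (List (String × List (String × String))) × (List (String × List (String × String))) × (List (String × List (String × String)))) : Decidable (Spec_getslotvaluesbycategories slots out) := by
  unfold Spec_getslotvaluesbycategories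
  -- built by hand: default instance search exceeds its size limit on the 5-tuple
  have h1 : DecidableEq (List (String × List (String × String))) := inferInstance
  have h2 := @instDecidableEqProd _ _ h1 h1
  have h3 := @instDecidableEqProd _ _ h1 h2
  have h4 := @instDecidableEqProd _ _ h1 h3
  have h5 := @instDecidableEqProd _ _ h1 h4
  exact h5 out (getslotvaluesbycategories_alt slots)

-- ===== CLAIM (what is proved, stated in full; the proofs are below) =====
def Claim_equal_getslotvaluesbycategories : Prop := ∀ (slots : List (String × List (String × List (String × String)))), Dom_getslotvaluesbycategories slots → Pre_getslotvaluesbycategories slots → Spec_getslotvaluesbycategories slots (getslotvaluesbycategories slots)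

-- ===== LEMMAS AND PROOFS =====

-- a fold whose step acts componentwise projects to a fold on the component
theorem pvFoldProj {α β γ : Type} (π : α → β) (F : α → γ → α) (f : β → γ → β)
    (h : ∀ s p, π (F s p) = f (π s) p) :
    ∀ (l : List γ) (s : α), π (l.foldl F s) = l.foldl f (π s) := by
  intro l
  induction l with
  | nil => intro s; rfl
  | cons p l ih => intro s; simp only [List.foldl_cons, h, ih]

-- the item loops, started from a dict whose entry at `domain` is `w`
theorem pvCopyLoop (domain : String) :
    ∀ (kv : List (String × String)) (e : pvD2) (w : PySem.Dict String String),
    kv.foldl (fun d q => d.insert domain ((d.getD domain PySem.Dict.empty).insert q.1 q.2))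
        (e.insert domain w)
      = e.insert domain (kv.foldl (fun d q => d.insert q.1 q.2) w) := by
  intro kv
  induction kv with
  | nil => intro e w; rfl
  | cons q kv ih =>
      intro e w
      simp only [List.foldl_cons, PySem.Dict.getD_insert_self, PySem.Dict.insert_insert_self, ih]

theorem pvBookLoop (domain : String) :
    ∀ (kv : List (String × String)) (e : pvD2) (w : PySem.Dict String String),
    kv.foldl (fun d q => if q.1 == "invalid" || q.1 == "pre_invalid" then d
        else d.insert domain ((d.getD domain PySem.Dict.empty).insert ("book" ++ q.1) q.2))
        (e.insert domain w)
      = e.insert domain ((kv.filter (fun q => !(q.1 == "invalid" || q.1 == "pre_invalid"))).foldl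
          (fun d q => d.insert ("book" ++ q.1) q.2) w) := by
  intro kv
  induction kv with
  | nil => intro e w; rfl
  | cons q kv ih =>
      intro e w
      rw [List.foldl_cons, List.filter_cons]
      by_cases hq : (q.1 == "invalid" || q.1 == "pre_invalid") = true
      · rw [if_pos hq, if_neg (by rw [hq]; simp)]
        exact ih e w
      · rw [if_neg hq, if_pos (by rw [Bool.not_eq_true] at hq; rw [hq]; simp),
          PySem.Dict.getD_insert_self, PySem.Dict.insert_insert_self, List.foldl_cons]
        exact ih e (w.insert ("book" ++ q.1) q.2)

-- the three per-key updates, at a domain not yet present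
theorem pvUpdCopy_fresh (domain : String) (c : pvD2) (kv : List (String × String))
    (hc : c.contains domain = false) :
    pvUpdCopy domain c kv
      = c.insert domain (kv.foldl (fun d q => d.insert q.1 q.2) PySem.Dict.empty) := by
  unfold pvUpdCopy
  rw [if_neg (by simp [hc]), pvCopyLoop]

theorem pvUpdBook_fresh (domain : String) (c : pvD2) (kv : List (String × String))
    (hc : c.contains domain = false) :
    pvUpdBook domain c kv
      = c.insert domain ((kv.filter (fun q => !(q.1 == "invalid" || q.1 == "pre_invalid"))).foldl
          (fun d q => d.insert ("book" ++ q.1) q.2) PySem.Dict.empty) := by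
  unfold pvUpdBook
  rw [if_neg (by simp [hc]), pvBookLoop]

theorem pvUpdReqt_fresh (domain : String) (c : pvD2) (kv : List (String × String))
    (hc : c.contains domain = false) :
    pvUpdReqt domain c kv = c.insert domain (PySem.Dict.mk kv) := by
  unfold pvUpdReqt
  rw [if_neg (by simp [hc]), PySem.Dict.insert_insert_self]

-- projections of A's inner-loop body: each component sees exactly its own key
theorem pvKeyStepA_1 (domain : String) (st : pvSt) (p : String × List (String × String)) :
    (pvKeyStepA domain st p).1 = if p.1 == "info" then pvUpdCopy domain st.1 p.2 else st.1 := by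
  simp only [pvKeyStepA]; split_ifs <;> rfl
theorem pvKeyStepA_2 (domain : String) (st : pvSt) (p : String × List (String × String)) :
    (pvKeyStepA domain st p).2.1 = if p.1 == "book" then pvUpdBook domain st.2.1 p.2 else st.2.1 := by
  simp only [pvKeyStepA]; split_ifs <;> simp_all
theorem pvKeyStepA_3 (domain : String) (st : pvSt) (p : String × List (String × String)) :
    (pvKeyStepA domain st p).2.2.1 = if p.1 == "reqt" then pvUpdReqt domain st.2.2.1 p.2 else st.2.2.1 := by
  simp only [pvKeyStepA]; split_ifs <;> simp_all
theorem pvKeyStepA_4 (domain : String) (st : pvSt) (p : String × List (String × String)) :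
    (pvKeyStepA domain st p).2.2.2.1 = if p.1 == "fail_info" then pvUpdCopy domain st.2.2.2.1 p.2 else st.2.2.2.1 := by
  simp only [pvKeyStepA]; split_ifs <;> simp_all
theorem pvKeyStepA_5 (domain : String) (st : pvSt) (p : String × List (String × String)) :
    (pvKeyStepA domain st p).2.2.2.2 = if p.1 == "fail_book" then pvUpdBook domain st.2.2.2.2 p.2 else st.2.2.2.2 := by
  simp only [pvKeyStepA]; split_ifs <;> simp_all

-- a key that never occurs leaves the component untouched
theorem pvCatFoldSkip (K : String) (upd : pvD2 → List (String × String) → pvD2) :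
    ∀ (dv : List (String × List (String × String))) (c : pvD2),
    (∀ p ∈ dv, (p.1 == K) = false) →
    dv.foldl (fun c p => if p.1 == K then upd c p.2 else c) c = c := by
  intro dv
  induction dv with
  | nil => intro c _; rfl
  | cons p dv ih =>
      intro c h
      simp only [List.foldl_cons, h p (by simp)]
      exact ih c (fun q hq => h q (by simp [hq]))

-- over distinct keys, the component fold is a single dict lookup
theorem pvCatFold (K : String) (upd : pvD2 → List (String × String) → pvD2) :
    ∀ (dv : List (String × List (String × String))) (c : pvD2),
    (dv.map Prod.fst).Nodup →
    dv.foldl (fun c p => if p.1 == K then upd c p.2 else c) c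
      = (match (PySem.Dict.mk dv).get? K with | none => c | some kv => upd c kv) := by
  intro dv
  induction dv with
  | nil => intro c _; rfl
  | cons p dv ih =>
      intro c hnd
      rw [List.map_cons] at hnd
      obtain ⟨hnotin, hrest⟩ := List.nodup_cons.mp hnd
      have hcons := PySem.Dict.get?_mk_cons (k := p.1) (v := p.2) (rest := dv) (x := K)
      by_cases hp : (p.1 == K) = true
      · have hpK : p.1 = K := by simpa using hp
        have hskip : ∀ q ∈ dv, (q.1 == K) = false := by
          intro q hq
          by_contra hne
          have hqK : q.1 = K := by simpa using hne
          exact hnotin (by rw [hpK, ← hqK]; exact List.mem_map_of_mem hq)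
        simp only [List.foldl_cons, if_pos hp]
        rw [pvCatFoldSkip K upd dv _ hskip, hcons, if_pos hp]
      · simp only [List.foldl_cons, if_neg hp]
        rw [ih c hrest, hcons, if_neg hp]

-- outer loop, per component: fresh distinct domains append their category entry
theorem pvOuterFold (K : String) (upd : String → pvD2 → List (String × String) → pvD2)
    (W : List (String × String) → PySem.Dict String String)
    (hupd : ∀ domain c kv, c.contains domain = false → upd domain c kv = c.insert domain (W kv)) :
    ∀ (slots : List (String × List (String × List (String × String)))) (c : pvD2),
    (slots.map Prod.fst).Nodup →
    (∀ q ∈ slots, (q.2.map Prod.fst).Nodup) →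
    (∀ d ∈ slots.map Prod.fst, c.contains d = false) →
    pvItems2 (slots.foldl (fun c q => q.2.foldl (fun c p => if p.1 == K then upd q.1 c p.2 else c) c) c)
      = pvItems2 c ++ slots.filterMap (fun q => ((PySem.Dict.mk q.2).get? K).map (fun kv => (q.1, (W kv).items))) := by
  intro slots
  induction slots with
  | nil => intro c _ _ _; simp
  | cons q slots ih =>
      intro c hnd hin hfr
      have hqfr : c.contains q.1 = false := hfr q.1 (by simp)
      rw [List.map_cons] at hnd
      obtain ⟨hq1notin, hnd'⟩ := List.nodup_cons.mp hnd
      simp only [List.foldl_cons, List.filterMap_cons]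
      rw [pvCatFold K (upd q.1) q.2 c (hin q (by simp))]
      cases hget : (PySem.Dict.mk q.2).get? K with
      | none =>
          rw [ih c hnd' (fun r hr => hin r (by simp [hr])) (fun d hd => hfr d (by simp [hd]))]
          simp
      | some kv =>
          dsimp only
          rw [hupd q.1 c kv hqfr]
          rw [ih (c.insert q.1 (W kv)) hnd'
            (fun r hr => hin r (by simp [hr]))
            (fun d hd => by
              rw [PySem.Dict.contains_insert]
              have hdq : d ≠ q.1 := fun h => hq1notin (h ▸ hd)
              simp [hdq, hfr d (by simp [hd])])]
          have : pvItems2 (c.insert q.1 (W kv)) = pvItems2 c ++ [(q.1, (W kv).items)] := by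
            unfold pvItems2
            rw [PySem.Dict.items_insert_of_not_contains c (W kv) hqfr]
            simp
          rw [this, List.append_assoc]
          simp

-- building a dict from distinct keys gives back exactly that assoc list
theorem pvItems_copy (kv : List (String × String)) (h : (kv.map Prod.fst).Nodup) :
    (kv.foldl (fun d q => d.insert q.1 q.2) (PySem.Dict.empty : PySem.Dict String String)).items = kv := by
  have := PySem.Dict.items_foldl_insert_fresh kv Prod.fst Prod.snd PySem.Dict.empty
    (fun a _ => by simp [pysem]) h
  simpa using this

theorem pvBookAppend_inj : Function.Injective (fun s : String => "book" ++ s) := by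
  intro s t h
  have h2 := congrArg String.toList h
  simp only [String.toList_append] at h2
  exact String.toList_injective (List.append_cancel_left h2)

theorem pvItems_book (kv : List (String × String)) (h : (kv.map Prod.fst).Nodup) :
    ((kv.filter (fun q => !(q.1 == "invalid" || q.1 == "pre_invalid"))).foldl
        (fun d q => d.insert ("book" ++ q.1) q.2) (PySem.Dict.empty : PySem.Dict String String)).items
      = pvBookList kv := by
  have hf : ((kv.filter (fun q => !(q.1 == "invalid" || q.1 == "pre_invalid"))).map Prod.fst).Nodup :=
    (List.Sublist.map Prod.fst List.filter_sublist).nodup h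
  have hmapped : ((kv.filter (fun q => !(q.1 == "invalid" || q.1 == "pre_invalid"))).map
      (fun q : String × String => "book" ++ q.1)).Nodup := by
    have : (kv.filter (fun q => !(q.1 == "invalid" || q.1 == "pre_invalid"))).map
        (fun q : String × String => "book" ++ q.1)
        = ((kv.filter (fun q => !(q.1 == "invalid" || q.1 == "pre_invalid"))).map Prod.fst).map
            (fun s => "book" ++ s) := by
      simp [List.map_map, Function.comp]
    rw [this]
    exact hf.map (fun _ _ h => pvBookAppend_inj h)
  have := PySem.Dict.items_foldl_insert_fresh
    (kv.filter (fun q => !(q.1 == "invalid" || q.1 == "pre_invalid")))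
    (fun q => "book" ++ q.1) Prod.snd PySem.Dict.empty
    (fun a _ => by simp [pysem]) hmapped
  simpa [pvBookList] using this

-- a value looked up in a domain's dict has distinct keys (from Pre_)
theorem pvInnerNodup (slots : List (String × List (String × List (String × String))))
    (hpre : Pre_getslotvaluesbycategories slots)
    (q : String × List (String × List (String × String))) (hq : q ∈ slots)
    (K : String) (kv : List (String × String)) (hget : (PySem.Dict.mk q.2).get? K = some kv) :
    (kv.map Prod.fst).Nodup := by
  have hmem : (K, kv) ∈ (PySem.Dict.mk q.2).items := PySem.Dict.mem_items_of_get?_eq_some _ hget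
  exact ((hpre.2 q hq).2 (K, kv) hmem)

-- ===== VERDICT (by name: the statement is the Claim_ definition above) =====
theorem getslotvaluesbycategories_spec : Claim_equal_getslotvaluesbycategories := by
  intro slots _ hpre
  unfold Spec_getslotvaluesbycategories getslotvaluesbycategories getslotvaluesbycategories_alt
  have hin : ∀ q ∈ slots, (q.2.map Prod.fst).Nodup := fun q hq => (hpre.2 q hq).1
  have hfr : ∀ d ∈ slots.map Prod.fst,
      (PySem.Dict.empty : pvD2).contains d = false := fun d _ => by simp [pysem]
  have comp : ∀ (K : String) (upd : String → pvD2 → List (String × String) → pvD2)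
      (W : List (String × String) → PySem.Dict String String)
      (hupd : ∀ domain c kv, c.contains domain = false → upd domain c kv = c.insert domain (W kv))
      (π : pvSt → pvD2)
      (hπ : ∀ domain st p, π (pvKeyStepA domain st p)
              = if p.1 == K then upd domain (π st) p.2 else π st)
      (hπe : π (PySem.Dict.empty, PySem.Dict.empty, PySem.Dict.empty, PySem.Dict.empty, PySem.Dict.empty)
              = PySem.Dict.empty),
      pvItems2 (π (pvFoldA slots))
        = slots.filterMap (fun q => ((PySem.Dict.mk q.2).get? K).map (fun kv => (q.1, (W kv).items))) := by
    intro K upd W hupd π hπ hπe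
    unfold pvFoldA
    rw [pvFoldProj π _ (fun c q => q.2.foldl (fun c p => if p.1 == K then upd q.1 c p.2 else c) c)
      (fun st q => pvFoldProj π (pvKeyStepA q.1)
        (fun c p => if p.1 == K then upd q.1 c p.2 else c) (hπ q.1) q.2 st) slots _]
    rw [hπe, pvOuterFold K upd W hupd slots _ hpre.1 hin hfr]
    rfl
  refine Prod.ext ?_ (Prod.ext ?_ (Prod.ext ?_ (Prod.ext ?_ ?_)))
  · show pvItems2 (pvFoldA slots).1
        = slots.filterMap (fun q => ((PySem.Dict.mk q.2).get? "info").map (fun kv => (q.1, kv)))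
    rw [comp "info" pvUpdCopy _ pvUpdCopy_fresh (fun st => st.1) pvKeyStepA_1 rfl]
    exact List.filterMap_congr (fun q hq => by
      cases hget : (PySem.Dict.mk q.2).get? "info" with
      | none => rfl
      | some kv => simp only [Option.map_some]; rw [pvItems_copy kv (pvInnerNodup slots hpre q hq _ kv hget)])
  · show pvItems2 (pvFoldA slots).2.1
        = slots.filterMap (fun q => ((PySem.Dict.mk q.2).get? "book").map (fun kv => (q.1, pvBookList kv)))
    rw [comp "book" pvUpdBook _ pvUpdBook_fresh (fun st => st.2.1) pvKeyStepA_2 rfl]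
    exact List.filterMap_congr (fun q hq => by
      cases hget : (PySem.Dict.mk q.2).get? "book" with
      | none => rfl
      | some kv => simp only [Option.map_some]; rw [pvItems_book kv (pvInnerNodup slots hpre q hq _ kv hget)])
  · show pvItems2 (pvFoldA slots).2.2.1
        = slots.filterMap (fun q => ((PySem.Dict.mk q.2).get? "reqt").map (fun kv => (q.1, kv)))
    rw [comp "reqt" pvUpdReqt PySem.Dict.mk pvUpdReqt_fresh (fun st => st.2.2.1) pvKeyStepA_3 rfl]
  · show pvItems2 (pvFoldA slots).2.2.2.1
        = slots.filterMap (fun q => ((PySem.Dict.mk q.2).get? "fail_info").map (fun kv => (q.1, kv)))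
    rw [comp "fail_info" pvUpdCopy _ pvUpdCopy_fresh (fun st => st.2.2.2.1) pvKeyStepA_4 rfl]
    exact List.filterMap_congr (fun q hq => by
      cases hget : (PySem.Dict.mk q.2).get? "fail_info" with
      | none => rfl
      | some kv => simp only [Option.map_some]; rw [pvItems_copy kv (pvInnerNodup slots hpre q hq _ kv hget)])
  · show pvItems2 (pvFoldA slots).2.2.2.2
        = slots.filterMap (fun q => ((PySem.Dict.mk q.2).get? "fail_book").map (fun kv => (q.1, pvBookList kv)))
    rw [comp "fail_book" pvUpdBook _ pvUpdBook_fresh (fun st => st.2.2.2.2) pvKeyStepA_5 rfl]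
    exact List.filterMap_congr (fun q hq => by
      cases hget : (PySem.Dict.mk q.2).get? "fail_book" with
      | none => rfl
      | some kv => simp only [Option.map_some]; rw [pvItems_book kv (pvInnerNodup slots hpre q hq _ kv hget)])
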